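-- pv_equiv track=rewrite | github.com/mohos26/Challenges | Edabit/Python/Hard/Quad Sequence.py | quad_sequence
-- ===== SOURCE A (Python) =====
-- def quad_sequence(lst):
-- 	res = [lst[-1]]
-- 	arg = lst[-1] - lst[-2]
-- 	aid = lst[2] - lst[1] * 2 + lst[0]
-- 	for _ in range(len(lst)):
-- 		arg += aid
-- 		res.append(res[-1] + arg)
-- 	return res[1:]
-- ===== SOURCE B (Python) =====
-- def quad_sequence(lst):
-- 	last = lst[-1]
-- 	fd = lst[-1] - lst[-2]
-- 	aid = lst[2] - 2 * lst[1] + lst[0]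
-- 	return [last + k * fd + aid * (k * (k + 1) // 2) for k in range(1, len(lst) + 1)]
-- ===== Notes on version B (the rewrite author's own statement) =====
-- stated objective: alternative
-- what changed: Replaced the running first/second-difference accumulation loop (mutable arg and growing res) by a direct closed-form list comprehension: term k is last + k*fd + aid*k*(k+1)//2; Pre_ excludes only lists of length < 3, on which A raises IndexError.
import Mathlib
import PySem

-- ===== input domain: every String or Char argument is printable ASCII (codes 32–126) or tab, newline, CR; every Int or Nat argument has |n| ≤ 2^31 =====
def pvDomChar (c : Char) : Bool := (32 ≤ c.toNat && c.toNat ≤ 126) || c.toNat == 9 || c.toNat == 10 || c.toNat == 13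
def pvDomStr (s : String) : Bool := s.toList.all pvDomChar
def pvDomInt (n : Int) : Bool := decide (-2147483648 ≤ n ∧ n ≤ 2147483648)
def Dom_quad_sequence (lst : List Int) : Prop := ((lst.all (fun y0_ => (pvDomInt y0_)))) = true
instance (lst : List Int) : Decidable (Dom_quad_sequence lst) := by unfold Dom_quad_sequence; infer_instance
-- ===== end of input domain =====

-- B replaces A's running first/second-difference accumulation by a closed-form
-- per-index formula (triangular numbers); same cost, different decomposition.


-- ===== PORT A =====
-- res = [lst[-1]]; arg = lst[-1]-lst[-2]; aid = lst[2]-lst[1]*2+lst[0];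
-- for _ in range(len(lst)): arg += aid; res.append(res[-1]+arg); return res[1:]
def quad_sequence (lst : List Int) : List Int :=
  match PySem.List.pyGet? lst (-1), PySem.List.pyGet? lst (-2),
        PySem.List.pyGet? lst 2, PySem.List.pyGet? lst 1, PySem.List.pyGet? lst 0 with
  | some l1, some l2, some c2, some c1, some c0 =>
    let aid := c2 - c1 * 2 + c0
    (((List.range lst.length).foldl
        (fun (p : List Int × Int) _ =>
          let arg := p.2 + aid
          (p.1 ++ [(PySem.List.pyGet? p.1 (-1)).getD 0 + arg], arg))
        ([l1], l1 - l2)).1).drop 1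
  | _, _, _, _, _ => []   -- IndexError in Python; excluded by Pre_

-- ===== PORT B =====
-- return [last + k*fd + aid*(k*(k+1)//2) for k in range(1, len(lst)+1)]
def quad_sequence_alt (lst : List Int) : List Int :=
  (((PySem.List.pyGet? lst (-1)).bind fun last =>
    (PySem.List.pyGet? lst (-2)).bind fun prev =>
    (PySem.List.pyGet? lst 2).bind fun c2 =>
    (PySem.List.pyGet? lst 1).bind fun c1 =>
    (PySem.List.pyGet? lst 0).map fun c0 =>
      let fd := last - prev
      let aid := c2 - 2 * c1 + c0
      (PySem.List.pyRange 1 ((lst.length : Int) + 1) 1).map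
        (fun k => last + k * fd + aid * (PySem.Int.floordiv (k * (k + 1)) 2))).getD [])
  -- any 'none' above is an IndexError in Python; those inputs are excluded by Pre_

-- ===== PRECONDITION & SPEC =====
-- Pre_ excludes exactly the lists of length < 3, on which A raises IndexError.
def Pre_quad_sequence (lst : List Int) : Prop := 3 ≤ lst.length
instance (lst : List Int) : Decidable (Pre_quad_sequence lst) := by unfold Pre_quad_sequence; infer_instance
def pvWitness_quad_sequence : List Int := [1, 2, 4]

def Spec_quad_sequence (lst : List Int) (out : List Int) : Prop := out = quad_sequence_alt lst
instance (lst : List Int) (out : List Int) : Decidable (Spec_quad_sequence lst out) := by unfold Spec_quad_sequence; infer_instance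

-- ===== CLAIM (what is proved, stated in full; the proofs are below) =====
def Claim_equal_quad_sequence : Prop := ∀ (lst : List Int), Dom_quad_sequence lst → Pre_quad_sequence lst → Spec_quad_sequence lst (quad_sequence lst)

-- ===== LEMMAS AND PROOFS =====

-- the closed-form term: g last fd aid k = last + k*fd + aid * (k*(k+1)//2); g _ _ _ 0 = last
def pvG (last fd aid k : Int) : Int := last + k * fd + aid * (PySem.Int.floordiv (k * (k + 1)) 2)

theorem pvTri_succ (k : Int) : PySem.Int.floordiv ((k + 1) * ((k + 1) + 1)) 2
    = PySem.Int.floordiv (k * (k + 1)) 2 + (k + 1) := by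
  rw [PySem.Int.floordiv_eq_ediv_of_pos (by norm_num : (0:Int) < 2),
      PySem.Int.floordiv_eq_ediv_of_pos (by norm_num : (0:Int) < 2)]
  have h : (k + 1) * ((k + 1) + 1) = k * (k + 1) + (k + 1) * 2 := by ring
  rw [h]
  generalize k * (k + 1) = m
  omega

theorem pvG_succ (last fd aid k : Int) :
    pvG last fd aid (k + 1) = pvG last fd aid k + (fd + (k + 1) * aid) := by
  unfold pvG
  rw [pvTri_succ]
  ring

theorem pvG_zero (last fd aid : Int) : pvG last fd aid 0 = last := by
  unfold pvG
  simp [PySem.Int.floordiv]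

-- loop invariant for A's foldl
theorem pvLoopA (last fd aid : Int) (n : Nat) :
    (List.range n).foldl
      (fun (p : List Int × Int) _ =>
        let arg := p.2 + aid
        (p.1 ++ [(PySem.List.pyGet? p.1 (-1)).getD 0 + arg], arg))
      ([last], fd)
    = ((List.range (n + 1)).map (fun (j : Nat) => pvG last fd aid (j : Int)), fd + n * aid) := by
  induction n with
  | zero => simp [pvG_zero]
  | succ n ih =>
    rw [List.range_succ, List.foldl_append, ih]
    simp only [List.foldl_cons, List.foldl_nil, Prod.mk.injEq]
    refine ⟨?_, ?_⟩
    · rw [List.range_succ (n := n + 1), List.map_append]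
      congr 1
      have hlast : (PySem.List.pyGet?
          ((List.range (n + 1)).map (fun (j : Nat) => pvG last fd aid (j : Int))) (-1)).getD 0
          = pvG last fd aid (n : Int) := by
        rw [PySem.List.pyGet?_neg_one, List.getLast?_eq_getElem?]
        simp
      rw [hlast]
      simp only [List.map_cons, List.map_nil]
      congr 1
      have hc : (((n + 1 : Nat)) : Int) = (n : Int) + 1 := by push_cast; ring
      rw [hc, pvG_succ]
      ring
    · push_cast; ring

theorem quad_sequence_spec : Claim_equal_quad_sequence := by
  intro lst _ hpre
  have hlen : 3 ≤ lst.length := hpre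
  have hne : ∀ i : Int, -(lst.length : Int) ≤ i → i < lst.length →
      ∃ x, PySem.List.pyGet? lst i = some x := by
    intro i h1 h2
    rcases h : PySem.List.pyGet? lst i with _ | x
    · rw [PySem.List.pyGet?_eq_none_iff] at h
      exact absurd ⟨h1, h2⟩ h
    · exact ⟨x, rfl⟩
  obtain ⟨a1, h1⟩ := hne (-1) (by omega) (by omega)
  obtain ⟨a2, h2⟩ := hne (-2) (by omega) (by omega)
  obtain ⟨b2, h3⟩ := hne 2 (by omega) (by omega)
  obtain ⟨b1, h4⟩ := hne 1 (by omega) (by omega)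
  obtain ⟨b0, h5⟩ := hne 0 (by omega) (by omega)
  show quad_sequence lst = quad_sequence_alt lst
  unfold quad_sequence quad_sequence_alt
  rw [h1, h2, h3, h4, h5]
  simp only [Option.bind_some, Option.map_some, Option.getD_some]
  rw [pvLoopA a1 (a1 - a2) (b2 - b1 * 2 + b0) lst.length]
  rw [PySem.List.pyRange_one]
  have hn : (((lst.length : Int) + 1 - 1)).toNat = lst.length := by omega
  rw [hn, List.range_succ_eq_map, List.map_cons, List.drop_one, List.tail_cons, List.map_map]
  simp only [List.map_map]
  apply List.map_congr_left
  intro j _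
  simp only [Function.comp_apply, Nat.succ_eq_add_one]
  have h : (1 : Int) + (j : Int) = (j : Int) + 1 := by ring
  rw [h]
  unfold pvG
  push_cast
  ring
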